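-- pv_equiv track=rewrite | github.com/Xue-Yuan/LeetCode-Python | google_hold water.py | holdWater
-- ===== SOURCE A (Python) =====
-- def holdWater(bars, limit):
--     ans, water = [], 0
--     for bar in bars + [float('inf')]:
--         if bar > limit:
--             if water:
--                 ans.append(water)
--                 water = 0
--         else:
--             water += limit - bar
--     return ans
-- ===== SOURCE B (Python) =====
-- def holdWater(bars, limit):
--     # Phase 1: segment bars into maximal runs of bars <= limit (high bars are separators).
--     runs, in_run = [], False
--     for b in bars:
--         if b > limit:
--             in_run = False
--         elif in_run:
--             runs[-1].append(b)
--         else: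
--             runs.append([b])
--             in_run = True
--     # Phase 2: sum each run's capacity and keep the positive ones.
--     sums = [sum(limit - b for b in run) for run in runs]
--     return [s for s in sums if s > 0]
-- ===== Notes on version B (the rewrite author's own statement) =====
-- stated objective: alternative
-- what changed: Replaces A's single-pass accumulate-and-flush-on-boundary loop (with its float('inf') sentinel) by a two-phase decomposition: first segment the bars into maximal runs of bars <= limit, then map each run to its water sum and filter the positive ones; no sentinel or flush logic is needed.
import Mathlib
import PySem

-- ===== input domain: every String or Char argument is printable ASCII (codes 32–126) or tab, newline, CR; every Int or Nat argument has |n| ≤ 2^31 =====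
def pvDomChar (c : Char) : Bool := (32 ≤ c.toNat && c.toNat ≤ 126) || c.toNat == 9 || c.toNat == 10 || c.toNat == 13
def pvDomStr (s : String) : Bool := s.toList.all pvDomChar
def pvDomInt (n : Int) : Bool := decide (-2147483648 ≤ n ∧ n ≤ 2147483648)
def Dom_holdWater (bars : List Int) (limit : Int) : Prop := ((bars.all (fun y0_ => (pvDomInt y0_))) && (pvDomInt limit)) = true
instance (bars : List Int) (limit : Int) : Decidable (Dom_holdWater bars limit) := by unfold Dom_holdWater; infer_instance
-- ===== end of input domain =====

-- B replaces A's accumulate-and-flush loop (with inf sentinel) by a two-phase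
-- group-then-sum decomposition (segment runs of bars <= limit, then map/filter sums); alternative, same cost.


-- ===== PORT A =====
-- A's loop over bars + [float('inf')]: the sentinel iteration always takes the
-- `bar > limit` branch (inf > limit for any int limit), i.e. it flushes a nonzero
-- `water` at the end; loopA's nil case is exactly that final sentinel iteration.
def loopA (limit : Int) (bars : List Int) (ans : List Int) (water : Int) : List Int :=
  match bars with
  | [] => if water ≠ 0 then ans ++ [water] else ans
  | bar :: rest =>
    if bar > limit then
      loopA limit rest (if water ≠ 0 then ans ++ [water] else ans) 0
    else
      loopA limit rest ans (water + (limit - bar))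

def holdWater (bars : List Int) (limit : Int) : List Int :=
  loopA limit bars [] 0

-- ===== PORT B =====
-- Phase 1: one step of the run-building loop over state (runs, in_run).
def stepB (limit : Int) (st : List (List Int) × Bool) (b : Int) : List (List Int) × Bool :=
  if b > limit then (st.1, false)
  else if st.2 then (st.1.dropLast ++ [st.1.getLastD [] ++ [b]], true)
  else (st.1 ++ [[b]], true)

-- sum(limit - b for b in run)
def sumRun (limit : Int) (run : List Int) : Int :=
  run.foldl (fun s b => s + (limit - b)) 0

def holdWater_alt (bars : List Int) (limit : Int) : List Int :=
  let runs := (bars.foldl (stepB limit) ([], false)).1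
  let sums := runs.map (sumRun limit)
  sums.filter (fun s => decide (0 < s))

-- ===== PRECONDITION & SPEC =====
def Spec_holdWater (bars : List Int) (limit : Int) (out : List Int) : Prop := out = holdWater_alt bars limit
instance (bars : List Int) (limit : Int) (out : List Int) : Decidable (Spec_holdWater bars limit out) := by unfold Spec_holdWater; infer_instance

-- ===== CLAIM (what is proved, stated in full; the proofs are below) =====
def Claim_equal_holdWater : Prop := ∀ (bars : List Int) (limit : Int), Dom_holdWater bars limit → Spec_holdWater bars limit (holdWater bars limit)

-- ===== LEMMAS AND PROOFS =====

-- results produced from a list of finished runs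
def outOf (limit : Int) (runs : List (List Int)) : List Int :=
  (runs.map (sumRun limit)).filter (fun s => decide (0 < s))

theorem outOf_concat (limit : Int) (rs : List (List Int)) (cur : List Int) :
    outOf limit (rs ++ [cur]) =
      outOf limit rs ++ (if 0 < sumRun limit cur then [sumRun limit cur] else []) := by
  simp [outOf, List.filter_append]
  split_ifs with h <;> simp [h]

theorem sumRun_concat (limit : Int) (cur : List Int) (b : Int) :
    sumRun limit (cur ++ [b]) = sumRun limit cur + (limit - b) := by
  simp [sumRun, List.foldl_append]

-- the main invariant: A's flushed loop agrees with B's run-building fold,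
-- both in the "no open run" state and in the "open run cur" state.
theorem loop_inv (limit : Int) (rest : List Int) :
    (∀ rs : List (List Int),
        loopA limit rest (outOf limit rs) 0 =
          outOf limit (rest.foldl (stepB limit) (rs, false)).1) ∧
    (∀ (rs : List (List Int)) (cur : List Int), 0 ≤ sumRun limit cur →
        loopA limit rest (outOf limit rs) (sumRun limit cur) =
          outOf limit (rest.foldl (stepB limit) (rs ++ [cur], true)).1) := by
  induction rest with
  | nil =>
    constructor
    · intro rs; simp [loopA]
    · intro rs cur hcur
      simp only [loopA, List.foldl_nil]
      rw [outOf_concat]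
      split_ifs with h1 h2 h2 <;> simp_all <;> omega
  | cons b rest ih =>
    constructor
    · intro rs
      by_cases hb : b > limit
      · simp only [loopA, if_pos hb, if_neg (by simp : ¬ (0 : Int) ≠ 0),
          List.foldl_cons, stepB, if_pos hb]
        exact ih.1 rs
      · have h0 : (0 : Int) + (limit - b) = sumRun limit [b] := by simp [sumRun]
        simp only [loopA, if_neg hb, List.foldl_cons, stepB, if_neg hb]
        rw [h0]
        simpa using ih.2 rs [b] (by simp [sumRun]; omega)
    · intro rs cur hcur
      by_cases hb : b > limit
      · have flush : (if sumRun limit cur ≠ 0 then outOf limit rs ++ [sumRun limit cur]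
            else outOf limit rs) = outOf limit (rs ++ [cur]) := by
          rw [outOf_concat]
          split_ifs with h1 h2 h2 <;> simp_all <;> omega
        simp only [loopA, if_pos hb, List.foldl_cons, stepB, if_pos hb]
        rw [flush]
        exact ih.1 (rs ++ [cur])
      · have hstep : stepB limit (rs ++ [cur], true) b = (rs ++ [cur ++ [b]], true) := by
          simp [stepB, if_neg hb]
        simp only [loopA, if_neg hb, List.foldl_cons, hstep]
        rw [← sumRun_concat]
        exact ih.2 rs (cur ++ [b]) (by rw [sumRun_concat]; omega)

-- ===== VERDICT (by name: the statement is the Claim_ definition above) =====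
theorem holdWater_spec : Claim_equal_holdWater := by
  intro bars limit _
  show holdWater bars limit = holdWater_alt bars limit
  have h := (loop_inv limit bars).1 []
  simpa [holdWater, holdWater_alt, outOf] using h
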